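-- pv_equiv track=rewrite | github.com/airhac/Codeing_Test_prac | 알고리즘/[2022 KAKAO BLIND RECRUITMENT]사라지는 발판[LV3].py | B_turn
-- ===== SOURCE A (Python) =====
-- def A_turn(board, a_x, a_y, b_x, b_y, cnt):
--     n = len(board)
--     m = len(board[0])
--     dx, dy = [-1, 0, 1, 0], [0, -1, 0, 1]
--     if board[a_x][a_y] == 0:
--         return 1, cnt
--     winner = []
--     loser = []
--     check = False
--     for i in range(4):
--         nx, ny = a_x + dx[i], a_y + dy[i]
--         if 0 <= nx < n and 0 <= ny < m and board[nx][ny] == 1: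
--             check = True
--             board[a_x][a_y] = 0
--             is_win, score = B_turn(board, b_x, b_y, nx, ny, cnt + 1)
--             board[a_x][a_y] = 1
--             if is_win:
--                 winner.append(score)
--             else:
--                 loser.append(score)
--     if check:
--         if winner:
--             return 0, min(winner)
--         else:
--             return 1, max(loser)
--     else:
--         return 1, cnt
--
-- def B_turn(board, b_x, b_y, a_x, a_y, cnt):
--     n = len(board)
--     m = len(board[0])
--     dx, dy = [-1, 0, 1, 0], [0, -1, 0, 1]
--     if board[b_x][b_y] == 0:
--         return 1, cnt
--     winner = []
--     loser = []
--     check = False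
--     for i in range(4):
--         nx, ny = b_x + dx[i], b_y + dy[i]
--         if 0 <= nx < n and 0 <= ny < m and board[nx][ny] == 1:
--             check = True
--             board[b_x][b_y] = 0
--             is_win, score = A_turn(board, a_x, a_y, nx, ny, cnt + 1)
--             board[b_x][b_y] = 1
--             if is_win:
--                 winner.append(score)
--             else:
--                 loser.append(score)
--     if check:
--         if winner:
--             return 0, min(winner)
--         else:
--             return 1, max(loser)
--     else:
--         return 1, cnt
-- ===== SOURCE B (Python) =====
-- def B_turn(board, b_x, b_y, a_x, a_y, cnt):
--     n = len(board)
--     m = len(board[0])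
--
--     def put(bd, x, y, v):
--         # functional single-cell update
--         return bd[:x] + (bd[x][:y] + (v,) + bd[x][y + 1:],) + bd[x + 1:]
--
--     def solve(bd, cx, cy, ox, oy):
--         # current player at (cx, cy), other at (ox, oy); returns
--         # (is_win, depth, bd_after): the caller's score is its cnt + depth and
--         # bd_after is the board after the explored subtree (vacated cells marked 1)
--         if bd[cx][cy] == 0:
--             return (1, 0, bd)
--         wins = []
--         losses = []
--         cur = bd
--         for nx, ny in ((cx - 1, cy), (cx, cy - 1), (cx + 1, cy), (cx, cy + 1)):
--             if 0 <= nx < n and 0 <= ny < m and cur[nx][ny] == 1: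
--                 w, d, after = solve(put(cur, cx, cy, 0), ox, oy, nx, ny)
--                 cur = put(after, cx, cy, 1)
--                 (wins if w else losses).append(d + 1)
--         if wins:
--             return (0, min(wins), cur)
--         if losses:
--             return (1, max(losses), cur)
--         return (1, 0, cur)
--
--     w, d, _ = solve(tuple(tuple(row) for row in board), b_x, b_y, a_x, a_y)
--     return w, cnt + d
-- ===== Notes on version B (the rewrite author's own statement) =====
-- stated objective: alternative
-- what changed: The two identical mutually-recursive player functions are collapsed into one self-recursive role-swapping solver over an immutable board value (functional update/backtrack instead of in-place mutate/restore) that returns role-relative depths, cnt being added once at the top instead of threaded down the recursion.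
-- outside the precondition, e.g. on B_turn([[1]], -1, 0, 0, -1, 2): A returns (0, 3), B returns (0, 3); on B_turn([[1, 2], [1, 1]], 0, -1, 0, -1, 0): A returns (0, 1), B returns (0, 3)
import Mathlib
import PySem

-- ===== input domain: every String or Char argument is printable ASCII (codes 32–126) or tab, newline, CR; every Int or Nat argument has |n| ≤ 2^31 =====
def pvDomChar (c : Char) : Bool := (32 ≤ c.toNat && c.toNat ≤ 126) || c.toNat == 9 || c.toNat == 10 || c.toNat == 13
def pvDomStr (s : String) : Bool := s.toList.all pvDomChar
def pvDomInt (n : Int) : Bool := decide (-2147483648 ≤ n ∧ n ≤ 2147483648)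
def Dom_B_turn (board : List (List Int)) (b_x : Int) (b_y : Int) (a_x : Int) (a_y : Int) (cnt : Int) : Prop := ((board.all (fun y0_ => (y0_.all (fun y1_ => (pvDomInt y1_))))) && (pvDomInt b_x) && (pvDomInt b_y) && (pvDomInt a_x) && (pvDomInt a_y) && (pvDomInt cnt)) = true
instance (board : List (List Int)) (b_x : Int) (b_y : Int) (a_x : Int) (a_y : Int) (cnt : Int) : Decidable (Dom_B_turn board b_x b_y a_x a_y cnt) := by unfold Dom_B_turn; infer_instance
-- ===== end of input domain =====

-- B collapses A's two identical mutually-recursive player functions into one self-recursive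
-- role-swapping solver over an immutable board value returning role-relative depths (cnt is added
-- once at the top).  A mutates its `board` argument in place during the search (and, when the
-- starting cell held a value other than 0/1 and a move was tried, leaves it changed to 1);
-- the equivalence proved here is about the RETURN value only — B does not mutate its argument.

-- ===== PORT A =====
-- Python A mutates the shared `board` list in place; the port threads that board through every
-- call as explicit state (each function returns ((is_win, score), board_after)), which models the
-- aliasing exactly.  The recursion is run on a fuel harness (pvFuel, one unit per nonzero cell
-- plus one): each recursive call of the Python happens with the current cell just set from a
-- nonzero value to 0, so the nonzero count strictly decreases and the fuel is never exhausted on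
-- inputs where the Python returns.

-- loop body of A's `for i in range(4)` (both player functions share it verbatim in the Python);
-- state is (board, winner, loser, check), `child` is the recursive call to the other player.
def pvTurnStep (child : List (List Int) → Int → Int → ((Int × Int) × List (List Int)))
    (n m cx cy : Int) (st : List (List Int) × List Int × List Int × Bool) (i : Int) :
    List (List Int) × List Int × List Int × Bool :=
  let nx := cx + PySem.List.pyGetD [-1, 0, 1, 0] i 0
  let ny := cy + PySem.List.pyGetD [0, -1, 0, 1] i 0
  if 0 ≤ nx ∧ nx < n ∧ 0 ≤ ny ∧ ny < m ∧ PySem.List.pyGetD (PySem.List.pyGetD st.1 nx []) ny 0 = 1 then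
    -- board[cx][cy] = 0
    let r := child (PySem.List.pySetD st.1 cx (PySem.List.pySetD (PySem.List.pyGetD st.1 cx []) cy 0)) nx ny
    -- board[cx][cy] = 1
    let bd1 := PySem.List.pySetD r.2 cx (PySem.List.pySetD (PySem.List.pyGetD r.2 cx []) cy 1)
    if r.1.1 ≠ 0 then (bd1, st.2.1 ++ [r.1.2], st.2.2.1, true)
    else (bd1, st.2.1, st.2.2.1 ++ [r.1.2], true)
  else st

mutual
def pvAturn : Nat → List (List Int) → Int → Int → Int → Int → Int → ((Int × Int) × List (List Int))
  | 0, bd, _, _, _, _, cnt => ((1, cnt), bd)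
  | f + 1, bd, a_x, a_y, b_x, b_y, cnt =>
    let n : Int := bd.length
    let m : Int := (PySem.List.pyGetD bd 0 []).length
    if PySem.List.pyGetD (PySem.List.pyGetD bd a_x []) a_y 0 = 0 then ((1, cnt), bd)
    else
      let st := (PySem.List.pyRange 0 4 1).foldl
        (pvTurnStep (fun bd0 nx ny => pvBturn f bd0 b_x b_y nx ny (cnt + 1)) n m a_x a_y)
        (bd, [], [], false)
      if st.2.2.2 then
        if st.2.1 ≠ [] then ((0, PySem.List.minD st.2.1 (fun x => x) 0), st.1)
        else ((1, PySem.List.maxD st.2.2.1 (fun x => x) 0), st.1)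
      else ((1, cnt), st.1)

def pvBturn : Nat → List (List Int) → Int → Int → Int → Int → Int → ((Int × Int) × List (List Int))
  | 0, bd, _, _, _, _, cnt => ((1, cnt), bd)
  | f + 1, bd, b_x, b_y, a_x, a_y, cnt =>
    let n : Int := bd.length
    let m : Int := (PySem.List.pyGetD bd 0 []).length
    if PySem.List.pyGetD (PySem.List.pyGetD bd b_x []) b_y 0 = 0 then ((1, cnt), bd)
    else
      let st := (PySem.List.pyRange 0 4 1).foldl
        (pvTurnStep (fun bd0 nx ny => pvAturn f bd0 a_x a_y nx ny (cnt + 1)) n m b_x b_y)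
        (bd, [], [], false)
      if st.2.2.2 then
        if st.2.1 ≠ [] then ((0, PySem.List.minD st.2.1 (fun x => x) 0), st.1)
        else ((1, PySem.List.maxD st.2.2.1 (fun x => x) 0), st.1)
      else ((1, cnt), st.1)
end

-- fuel harness for both ports: number of nonzero cells + 1
def pvFuel (board : List (List Int)) : Nat :=
  (board.map (fun r => r.countP (fun v => !(v == 0)))).sum + 1

def B_turn (board : List (List Int)) (b_x : Int) (b_y : Int) (a_x : Int) (a_y : Int) (cnt : Int) : Int × Int :=
  (pvBturn (pvFuel board) board b_x b_y a_x a_y cnt).1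

-- ===== PORT B =====
-- Source B's `put`: bd[:x] + (bd[x][:y] + (v,) + bd[x][y+1:],) + bd[x+1:]
def pvPut (bd : List (List Int)) (x y : Int) (v : Int) : List (List Int) :=
  PySem.List.slice bd none (some x)
    ++ (PySem.List.slice (PySem.List.pyGetD bd x []) none (some y)
        ++ v :: PySem.List.slice (PySem.List.pyGetD bd x []) (some (y + 1)) none)
      :: PySem.List.slice bd (some (x + 1)) none

-- loop body of Source B's `for nx, ny in (...)`; state is (cur, wins, losses)
def pvSolveStep (child : List (List Int) → Int → Int → Int × Int × List (List Int))
    (n m cx cy : Int) (st : List (List Int) × List Int × List Int) (mv : Int × Int) :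
    List (List Int) × List Int × List Int :=
  if 0 ≤ mv.1 ∧ mv.1 < n ∧ 0 ≤ mv.2 ∧ mv.2 < m ∧ PySem.List.pyGetD (PySem.List.pyGetD st.1 mv.1 []) mv.2 0 = 1 then
    let r := child (pvPut st.1 cx cy 0) mv.1 mv.2
    if r.1 ≠ 0 then (pvPut r.2.2 cx cy 1, st.2.1 ++ [r.2.1 + 1], st.2.2)
    else (pvPut r.2.2 cx cy 1, st.2.1, st.2.2 ++ [r.2.1 + 1])
  else st

-- Source B's `solve` (same fuel harness as port A)
def pvSolve (n m : Int) : Nat → List (List Int) → Int → Int → Int → Int → Int × Int × List (List Int)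
  | 0, bd, _, _, _, _ => (1, 0, bd)
  | f + 1, bd, cx, cy, ox, oy =>
    if PySem.List.pyGetD (PySem.List.pyGetD bd cx []) cy 0 = 0 then (1, 0, bd)
    else
      let st := [(cx - 1, cy), (cx, cy - 1), (cx + 1, cy), (cx, cy + 1)].foldl
        (pvSolveStep (fun bd0 nx ny => pvSolve n m f bd0 ox oy nx ny) n m cx cy) (bd, [], [])
      if st.2.1 ≠ [] then (0, PySem.List.minD st.2.1 (fun x => x) 0, st.1)
      else if st.2.2 ≠ [] then (1, PySem.List.maxD st.2.2 (fun x => x) 0, st.1)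
      else (1, 0, st.1)

def B_turn_alt (board : List (List Int)) (b_x : Int) (b_y : Int) (a_x : Int) (a_y : Int) (cnt : Int) : Int × Int :=
  let r := pvSolve (board.length : Int) ((PySem.List.pyGetD board 0 []).length : Int)
      (pvFuel board) board b_x b_y a_x a_y
  (r.1, cnt + r.2.1)

-- ===== PRECONDITION & SPEC =====
-- Pre_ admits (i) the game's natural domain — a nonempty rectangular board with both starting
-- positions in (nonnegative) range — and (ii) every input on which A returns without ever taking a
-- move (starting cell 0, or no in-bounds neighbour holding 1), where both programs perform the very
-- same reads.  It excludes the inputs where A raises IndexError (empty/ragged board reached, index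
-- out of range) and the out-of-natural-domain games that still complete, whose value mixes Python's
-- negative-index wraparound with unwrapped neighbour arithmetic on a mutated board.
def Pre_B_turn (board : List (List Int)) (b_x : Int) (b_y : Int) (a_x : Int) (a_y : Int) (cnt : Int) : Prop :=
  PySem.Raise.InRange board.length b_x ∧
  PySem.Raise.InRange (PySem.List.pyGetD board b_x []).length b_y ∧
  ( (0 < (board.headD []).length ∧ (∀ r ∈ board, r.length = (board.headD []).length) ∧
      0 ≤ b_x ∧ 0 ≤ b_y ∧ 0 ≤ a_x ∧ a_x < (board.length : Int) ∧
      0 ≤ a_y ∧ a_y < ((board.headD []).length : Int))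
    ∨ PySem.List.pyGetD (PySem.List.pyGetD board b_x []) b_y 0 = 0
    ∨ (∀ mv ∈ [(b_x - 1, b_y), (b_x, b_y - 1), (b_x + 1, b_y), (b_x, b_y + 1)],
        (0 ≤ mv.1 ∧ mv.1 < (board.length : Int) ∧ 0 ≤ mv.2 ∧ mv.2 < ((PySem.List.pyGetD board 0 []).length : Int)) →
          (PySem.Raise.InRange (PySem.List.pyGetD board mv.1 []).length mv.2 ∧
           PySem.List.pyGetD (PySem.List.pyGetD board mv.1 []) mv.2 0 ≠ 1)) )

instance (board : List (List Int)) (b_x : Int) (b_y : Int) (a_x : Int) (a_y : Int) (cnt : Int) : Decidable (Pre_B_turn board b_x b_y a_x a_y cnt) := by unfold Pre_B_turn; infer_instance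

def pvWitness_B_turn : List (List Int) × Int × Int × Int × Int × Int := ([[1, 1], [0, 1]], 0, 0, 1, 1, 0)

def Spec_B_turn (board : List (List Int)) (b_x : Int) (b_y : Int) (a_x : Int) (a_y : Int) (cnt : Int) (out : Int × Int) : Prop := out = B_turn_alt board b_x b_y a_x a_y cnt
instance (board : List (List Int)) (b_x : Int) (b_y : Int) (a_x : Int) (a_y : Int) (cnt : Int) (out : Int × Int) : Decidable (Spec_B_turn board b_x b_y a_x a_y cnt out) := by unfold Spec_B_turn; infer_instance

-- ===== CLAIM (what is proved, stated in full; the proofs are below) =====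
def Claim_equal_B_turn : Prop := ∀ (board : List (List Int)) (b_x : Int) (b_y : Int) (a_x : Int) (a_y : Int) (cnt : Int), Dom_B_turn board b_x b_y a_x a_y cnt → Pre_B_turn board b_x b_y a_x a_y cnt → Spec_B_turn board b_x b_y a_x a_y cnt (B_turn board b_x b_y a_x a_y cnt)

-- ===== LEMMAS AND PROOFS =====

-- rectangular n×m board
def pvRect (bd : List (List Int)) (n m : Int) : Prop :=
  (bd.length : Int) = n ∧ ∀ r ∈ bd, (r.length : Int) = m

-- the common cell update both ports reduce to on an in-range position
def pvSetCell (bd : List (List Int)) (i j : Nat) (v : Int) : List (List Int) :=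
  bd.set i ((bd.getD i []).set j v)

theorem pvRect_setCell {bd : List (List Int)} {n m : Int} (h : pvRect bd n m)
    (i j : Nat) (v : Int) (hi : (i : Int) < n) :
    pvRect (pvSetCell bd i j v) n m := by
  obtain ⟨hlen, hrow⟩ := h
  refine ⟨by simpa [pvSetCell] using hlen, ?_⟩
  intro r hr
  rcases List.mem_or_eq_of_mem_set hr with h1 | h2
  · exact hrow r h1
  · subst h2
    have hi' : i < bd.length := by omega
    rw [List.length_set, List.getD_eq_getElem bd [] hi']
    exact hrow _ (List.getElem_mem hi')

theorem pvPutA_eq {bd : List (List Int)} {n m x y : Int} (h : pvRect bd n m)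
    (hx0 : 0 ≤ x) (hxn : x < n) (hy0 : 0 ≤ y) (v : Int) :
    PySem.List.pySetD bd x (PySem.List.pySetD (PySem.List.pyGetD bd x []) y v)
      = pvSetCell bd x.toNat y.toNat v := by
  obtain ⟨hlen, hrow⟩ := h
  have hx' : x.toNat < bd.length := by omega
  rw [PySem.List.pySetD_of_nonneg bd _ hx0, PySem.List.pySetD_of_nonneg _ _ hy0,
    PySem.List.pyGetD_eq_getElem bd [] hx0 (by omega), pvSetCell, List.getD_eq_getElem bd [] hx']

theorem pvPutB_eq {bd : List (List Int)} {n m x y : Int} (h : pvRect bd n m)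
    (hx0 : 0 ≤ x) (hxn : x < n) (hy0 : 0 ≤ y) (hym : y < m) (v : Int) :
    pvPut bd x y v = pvSetCell bd x.toNat y.toNat v := by
  unfold pvPut
  obtain ⟨hlen, hrow⟩ := h
  have hx' : x.toNat < bd.length := by omega
  have hrowx := hrow _ (List.getElem_mem hx')
  have hy' : y.toNat < bd[x.toNat].length := by omega
  rw [PySem.List.pyGetD_eq_getElem bd [] hx0 (by omega)]
  rw [PySem.List.slice_to bd hx0, PySem.List.slice_from bd (by omega : (0:Int) ≤ x + 1),
    PySem.List.slice_to _ hy0, PySem.List.slice_from _ (by omega : (0:Int) ≤ y + 1)]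
  rw [pvSetCell, List.getD_eq_getElem bd [] hx']
  rw [List.set_eq_take_cons_drop _ hx', List.set_eq_take_cons_drop _ hy']
  rw [show (x + 1).toNat = x.toNat + 1 by omega, show (y + 1).toNat = y.toNat + 1 by omega]

theorem pv_foldl_min_map_add (c : Int) : ∀ (t : List Int) (x : Int),
    (t.map (fun t => c + t)).foldl min (c + x) = c + t.foldl min x := by
  intro t
  induction t with
  | nil => intro x; rfl
  | cons y t ih =>
    intro x
    simp only [List.map_cons, List.foldl_cons]
    rw [show min (c + x) (c + y) = c + min x y from min_add_add_left c x y]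
    exact ih (min x y)

theorem pv_foldl_max_map_add (c : Int) : ∀ (t : List Int) (x : Int),
    (t.map (fun t => c + t)).foldl max (c + x) = c + t.foldl max x := by
  intro t
  induction t with
  | nil => intro x; rfl
  | cons y t ih =>
    intro x
    simp only [List.map_cons, List.foldl_cons]
    rw [show max (c + x) (c + y) = c + max x y from max_add_add_left c x y]
    exact ih (max x y)

theorem pv_minD_map_add (c : Int) (l : List Int) (hl : l ≠ []) :
    PySem.List.minD (l.map (fun t => c + t)) (fun x => x) 0
      = c + PySem.List.minD l (fun x => x) 0 := by
  cases l with
  | nil => exact absurd rfl hl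
  | cons x t =>
    unfold PySem.List.minD
    simp only [List.map_cons, PySem.List.min?_id_cons, Option.getD_some]
    exact pv_foldl_min_map_add c t x

theorem pv_maxD_map_add (c : Int) (l : List Int) (hl : l ≠ []) :
    PySem.List.maxD (l.map (fun t => c + t)) (fun x => x) 0
      = c + PySem.List.maxD l (fun x => x) 0 := by
  cases l with
  | nil => exact absurd rfl hl
  | cons x t =>
    unfold PySem.List.maxD
    simp only [List.map_cons, PySem.List.max?_id_cons, Option.getD_some]
    exact pv_foldl_max_map_add c t x

-- A's two player functions are literally the same function
theorem pvAturn_eq_pvBturn : ∀ (f : Nat) (bd : List (List Int)) (x y u v cnt : Int),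
    pvAturn f bd x y u v cnt = pvBturn f bd x y u v cnt := by
  intro f
  induction f with
  | zero => intro bd x y u v cnt; rfl
  | succ f ih =>
    intro bd x y u v cnt
    simp only [pvAturn, pvBturn]
    rw [show (fun bd0 nx ny => pvBturn f bd0 u v nx ny (cnt + 1))
        = (fun bd0 nx ny => pvAturn f bd0 u v nx ny (cnt + 1)) from
      funext fun b0 => funext fun nx => funext fun ny => (ih b0 u v nx ny (cnt + 1)).symm]

-- shape preservation for one of B's loop iterations
theorem pvSolveStep_rect {n m cx cy : Int}
    {childB : List (List Int) → Int → Int → Int × Int × List (List Int)}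
    (hshape : ∀ bd nx ny, pvRect bd n m → 0 ≤ nx → nx < n → 0 ≤ ny → ny < m →
      pvRect (childB bd nx ny).2.2 n m)
    (hcx0 : 0 ≤ cx) (hcxn : cx < n) (hcy0 : 0 ≤ cy) (hcym : cy < m)
    (st : List (List Int) × List Int × List Int) (hst : pvRect st.1 n m) (mv : Int × Int) :
    pvRect (pvSolveStep childB n m cx cy st mv).1 n m := by
  unfold pvSolveStep
  split
  · next hg =>
    have h0 : pvRect (pvPut st.1 cx cy 0) n m := by
      rw [pvPutB_eq hst hcx0 hcxn hcy0 hcym]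
      exact pvRect_setCell hst _ _ _ (by omega)
    have h1 : pvRect (childB (pvPut st.1 cx cy 0) mv.1 mv.2).2.2 n m :=
      hshape _ _ _ h0 hg.1 hg.2.1 hg.2.2.1 hg.2.2.2.1
    have h2 : pvRect (pvPut (childB (pvPut st.1 cx cy 0) mv.1 mv.2).2.2 cx cy 1) n m := by
      rw [pvPutB_eq h1 hcx0 hcxn hcy0 hcym]
      exact pvRect_setCell h1 _ _ _ (by omega)
    dsimp only
    split <;> exact h2
  · exact hst

-- pvSolve preserves the board's shape
theorem pvSolve_rect (n m : Int) : ∀ (f : Nat) (bd : List (List Int)) (cx cy ox oy : Int),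
    pvRect bd n m → 0 ≤ cx → cx < n → 0 ≤ cy → cy < m → 0 ≤ ox → ox < n → 0 ≤ oy → oy < m →
    pvRect (pvSolve n m f bd cx cy ox oy).2.2 n m := by
  intro f
  induction f with
  | zero => intro bd cx cy ox oy h _ _ _ _ _ _ _ _; exact h
  | succ f ih =>
    intro bd cx cy ox oy h hcx0 hcxn hcy0 hcym hox0 hoxn hoy0 hoym
    simp only [pvSolve]
    split
    · exact h
    · have hshape : ∀ bd0 nx ny, pvRect bd0 n m → 0 ≤ nx → nx < n → 0 ≤ ny → ny < m →
          pvRect (pvSolve n m f bd0 ox oy nx ny).2.2 n m := by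
        intro bd0 nx ny hb hnx0 hnxn hny0 hnym
        exact ih bd0 ox oy nx ny hb hox0 hoxn hoy0 hoym hnx0 hnxn hny0 hnym
      have h1 := pvSolveStep_rect hshape hcx0 hcxn hcy0 hcym (bd, [], []) h (cx - 1, cy)
      have h2 := pvSolveStep_rect hshape hcx0 hcxn hcy0 hcym _ h1 (cx, cy - 1)
      have h3 := pvSolveStep_rect hshape hcx0 hcxn hcy0 hcym _ h2 (cx + 1, cy)
      have h4 := pvSolveStep_rect hshape hcx0 hcxn hcy0 hcym _ h3 (cx, cy + 1)
      simp only [List.foldl] at h4 ⊢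
      split <;> [skip; split] <;> exact h4

-- relation between A's loop state and B's loop state
def pvRel (cnt : Int) (sA : List (List Int) × List Int × List Int × Bool)
    (sB : List (List Int) × List Int × List Int) : Prop :=
  sA.1 = sB.1 ∧ sA.2.1 = sB.2.1.map (fun t => cnt + t) ∧
  sA.2.2.1 = sB.2.2.map (fun t => cnt + t) ∧ sA.2.2.2 = (!sB.2.1.isEmpty || !sB.2.2.isEmpty)

-- one loop iteration preserves the relation (and the board's shape)
theorem pvStep_rel {n m cx cy cnt : Int}
    {childA : List (List Int) → Int → Int → ((Int × Int) × List (List Int))}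
    {childB : List (List Int) → Int → Int → Int × Int × List (List Int)}
    (hchild : ∀ bd nx ny, pvRect bd n m → 0 ≤ nx → nx < n → 0 ≤ ny → ny < m →
      childA bd nx ny = (((childB bd nx ny).1, (cnt + 1) + (childB bd nx ny).2.1), (childB bd nx ny).2.2))
    (hshape : ∀ bd nx ny, pvRect bd n m → 0 ≤ nx → nx < n → 0 ≤ ny → ny < m →
      pvRect (childB bd nx ny).2.2 n m)
    (hcx0 : 0 ≤ cx) (hcxn : cx < n) (hcy0 : 0 ≤ cy) (hcym : cy < m)
    (sA : List (List Int) × List Int × List Int × Bool) (sB : List (List Int) × List Int × List Int)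
    (hrel : pvRel cnt sA sB) (hrect : pvRect sB.1 n m) (i : Int) (mv : Int × Int)
    (hmv : (cx + PySem.List.pyGetD [-1, 0, 1, 0] i 0, cy + PySem.List.pyGetD [0, -1, 0, 1] i 0) = mv) :
    pvRel cnt (pvTurnStep childA n m cx cy sA i) (pvSolveStep childB n m cx cy sB mv) ∧
      pvRect (pvSolveStep childB n m cx cy sB mv).1 n m := by
  obtain ⟨hbd, hw, hl, hc⟩ := hrel
  obtain ⟨mva, mvb⟩ := mv
  injection hmv with hmv1 hmv2
  unfold pvTurnStep pvSolveStep
  dsimp only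
  rw [hbd, hmv1, hmv2]
  by_cases hg : 0 ≤ mva ∧ mva < n ∧ 0 ≤ mvb ∧ mvb < m ∧
      PySem.List.pyGetD (PySem.List.pyGetD sB.1 mva []) mvb 0 = 1
  · rw [if_pos hg, if_pos hg]
    rw [pvPutA_eq hrect hcx0 hcxn hcy0 0, pvPutB_eq hrect hcx0 hcxn hcy0 hcym 0]
    have hb0 : pvRect (pvSetCell sB.1 cx.toNat cy.toNat 0) n m :=
      pvRect_setCell hrect _ _ _ (by omega)
    have hch := hchild _ mva mvb hb0 hg.1 hg.2.1 hg.2.2.1 hg.2.2.2.1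
    rw [hch]
    have hafter : pvRect (childB (pvSetCell sB.1 cx.toNat cy.toNat 0) mva mvb).2.2 n m :=
      hshape _ mva mvb hb0 hg.1 hg.2.1 hg.2.2.1 hg.2.2.2.1
    rw [pvPutA_eq hafter hcx0 hcxn hcy0 1, pvPutB_eq hafter hcx0 hcxn hcy0 hcym 1]
    have hrect' : pvRect (pvSetCell (childB (pvSetCell sB.1 cx.toNat cy.toNat 0) mva mvb).2.2 cx.toNat cy.toNat 1) n m :=
      pvRect_setCell hafter _ _ _ (by omega)
    dsimp only
    by_cases hw0 : (childB (pvSetCell sB.1 cx.toNat cy.toNat 0) mva mvb).1 ≠ 0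
    · rw [if_pos hw0, if_pos hw0]
      refine ⟨⟨rfl, ?_, hl, by simp⟩, hrect'⟩
      rw [List.map_append, hw]
      simp only [List.map_cons, List.map_nil]
      congr 1
      congr 1
      ring
    · rw [if_neg hw0, if_neg hw0]
      refine ⟨⟨rfl, hw, ?_, by simp⟩, hrect'⟩
      rw [List.map_append, hl]
      simp only [List.map_cons, List.map_nil]
      congr 1
      congr 1
      ring
  · rw [if_neg hg, if_neg hg]
    exact ⟨⟨hbd, hw, hl, hc⟩, hrect⟩

-- the main simulation: on a rectangular board with all four coordinates in range,
-- A's player function computes B's solver value with cnt added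
theorem pvBturn_eq_solve : ∀ (f : Nat) (n m : Int) (bd : List (List Int)) (cx cy ox oy cnt : Int),
    pvRect bd n m → 0 ≤ cx → cx < n → 0 ≤ cy → cy < m → 0 ≤ ox → ox < n → 0 ≤ oy → oy < m →
    pvBturn f bd cx cy ox oy cnt
      = (((pvSolve n m f bd cx cy ox oy).1, cnt + (pvSolve n m f bd cx cy ox oy).2.1),
         (pvSolve n m f bd cx cy ox oy).2.2) := by
  intro f
  induction f with
  | zero =>
    intro n m bd cx cy ox oy cnt h hcx0 hcxn hcy0 hcym hox0 hoxn hoy0 hoym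
    simp [pvBturn, pvSolve]
  | succ f ih =>
    intro n m bd cx cy ox oy cnt h hcx0 hcxn hcy0 hcym hox0 hoxn hoy0 hoym
    have hm : ((PySem.List.pyGetD bd 0 []).length : Int) = m := by
      rw [PySem.List.pyGetD_eq_getElem bd [] le_rfl (by have hh := h.1; omega)]
      exact h.2 _ (List.getElem_mem _)
    simp only [pvBturn, pvSolve]
    rw [h.1, hm]
    by_cases hb : PySem.List.pyGetD (PySem.List.pyGetD bd cx []) cy 0 = 0
    · rw [if_pos hb, if_pos hb]; simp
    · rw [if_neg hb, if_neg hb]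
      rw [show PySem.List.pyRange 0 4 1 = [0, 1, 2, 3] from by decide]
      set childA := fun bd0 nx ny => pvAturn f bd0 ox oy nx ny (cnt + 1) with hA
      set childB := fun bd0 nx ny => pvSolve n m f bd0 ox oy nx ny with hB
      have hchild : ∀ bd0 nx ny, pvRect bd0 n m → 0 ≤ nx → nx < n → 0 ≤ ny → ny < m →
          childA bd0 nx ny = (((childB bd0 nx ny).1, (cnt + 1) + (childB bd0 nx ny).2.1), (childB bd0 nx ny).2.2) := by
        intro bd0 nx ny hb0 hnx0 hnxn hny0 hnym
        rw [hA, hB]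
        dsimp only
        rw [pvAturn_eq_pvBturn]
        exact ih n m bd0 ox oy nx ny (cnt + 1) hb0 hox0 hoxn hoy0 hoym hnx0 hnxn hny0 hnym
      have hshape : ∀ bd0 nx ny, pvRect bd0 n m → 0 ≤ nx → nx < n → 0 ≤ ny → ny < m →
          pvRect (childB bd0 nx ny).2.2 n m := by
        intro bd0 nx ny hb0 hnx0 hnxn hny0 hnym
        rw [hB]
        exact pvSolve_rect n m f bd0 ox oy nx ny hb0 hox0 hoxn hoy0 hoym hnx0 hnxn hny0 hnym
      have rel0 : pvRel cnt (bd, [], [], false) (bd, [], []) := ⟨rfl, rfl, rfl, rfl⟩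
      have h1 := pvStep_rel hchild hshape hcx0 hcxn hcy0 hcym _ _ rel0 h 0 (cx - 1, cy)
        (by rw [Prod.mk.injEq]; refine ⟨by norm_num [pysem]; (try decide); (try omega), by norm_num [pysem]; (try decide); (try omega)⟩)
      have h2 := pvStep_rel hchild hshape hcx0 hcxn hcy0 hcym _ _ h1.1 h1.2 1 (cx, cy - 1)
        (by rw [Prod.mk.injEq]; refine ⟨by norm_num [pysem]; (try decide); (try omega), by norm_num [pysem]; (try decide); (try omega)⟩)
      have h3 := pvStep_rel hchild hshape hcx0 hcxn hcy0 hcym _ _ h2.1 h2.2 2 (cx + 1, cy)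
        (by rw [Prod.mk.injEq]; refine ⟨by norm_num [pysem]; (try decide); (try omega), by norm_num [pysem]; (try decide); (try omega)⟩)
      have h4 := pvStep_rel hchild hshape hcx0 hcxn hcy0 hcym _ _ h3.1 h3.2 3 (cx, cy + 1)
        (by rw [Prod.mk.injEq]; refine ⟨by norm_num [pysem]; (try decide); (try omega), by norm_num [pysem]; (try decide); (try omega)⟩)
      simp only [List.foldl]
      obtain ⟨⟨hbd, hwin, hlose, hck⟩, _⟩ := h4
      set sA4 := pvTurnStep childA n m cx cy (pvTurnStep childA n m cx cy (pvTurnStep childA n m cx cy (pvTurnStep childA n m cx cy (bd, [], [], false) 0) 1) 2) 3 with hsA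
      set sB4 := pvSolveStep childB n m cx cy (pvSolveStep childB n m cx cy (pvSolveStep childB n m cx cy (pvSolveStep childB n m cx cy (bd, [], []) (cx - 1, cy)) (cx, cy - 1)) (cx + 1, cy)) (cx, cy + 1) with hsB
      by_cases hwn : sB4.2.1 = []
      · by_cases hls : sB4.2.2 = []
        · have : sA4.2.2.2 = false := by rw [hck, hwn, hls]; rfl
          rw [this, if_neg (by simp), if_neg (by simp [hwn]), if_neg (by simp [hls])]
          simp [hbd]
        · have : sA4.2.2.2 = true := by
            rw [hck, hwn]; simp [hls]
          rw [this, if_pos rfl, if_neg (by simp [hwin, hwn]), if_neg (by simp [hwn]),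
            if_pos (by simp [hls])]
          rw [hlose, pv_maxD_map_add cnt _ hls, hbd]
      · have : sA4.2.2.2 = true := by
          rw [hck]; simp [hwn]
        rw [this, if_pos rfl, if_pos (by simp [hwin, hwn]), if_pos (by simp [hwn])]
        rw [hwin, pv_minD_map_add cnt _ hwn, hbd]

-- ===== VERDICT (by name: the statement is the Claim_ definition above) =====
-- the two ports agree literally on every input on which no move is ever taken
theorem pv_nomove_case (board : List (List Int)) (b_x b_y a_x a_y cnt : Int)
    (hnomove : ∀ mv ∈ [(b_x - 1, b_y), (b_x, b_y - 1), (b_x + 1, b_y), (b_x, b_y + 1)],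
      (0 ≤ mv.1 ∧ mv.1 < (board.length : Int) ∧ 0 ≤ mv.2 ∧ mv.2 < ((PySem.List.pyGetD board 0 []).length : Int)) →
        (PySem.Raise.InRange (PySem.List.pyGetD board mv.1 []).length mv.2 ∧
         PySem.List.pyGetD (PySem.List.pyGetD board mv.1 []) mv.2 0 ≠ 1)) :
    B_turn board b_x b_y a_x a_y cnt = B_turn_alt board b_x b_y a_x a_y cnt := by
  have hng : ∀ mv ∈ [(b_x - 1, b_y), (b_x, b_y - 1), (b_x + 1, b_y), (b_x, b_y + 1)],
      ¬(0 ≤ mv.1 ∧ mv.1 < (board.length : Int) ∧ 0 ≤ mv.2 ∧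
          mv.2 < ((PySem.List.pyGetD board 0 []).length : Int) ∧
          PySem.List.pyGetD (PySem.List.pyGetD board mv.1 []) mv.2 0 = 1) := by
    intro mv hmem hgd
    exact (hnomove mv hmem ⟨hgd.1, hgd.2.1, hgd.2.2.1, hgd.2.2.2.1⟩).2 hgd.2.2.2.2
  unfold B_turn B_turn_alt
  simp only [pvFuel, pvBturn, pvSolve]
  by_cases hz : PySem.List.pyGetD (PySem.List.pyGetD board b_x []) b_y 0 = 0
  · rw [if_pos hz, if_pos hz]; simp
  · rw [if_neg hz, if_neg hz]
    rw [show PySem.List.pyRange 0 4 1 = [0, 1, 2, 3] from by decide]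
    have stepA_id : ∀ (childA : List (List Int) → Int → Int → ((Int × Int) × List (List Int)))
        (i : Int) (mv : Int × Int),
        (b_x + PySem.List.pyGetD [-1, 0, 1, 0] i 0, b_y + PySem.List.pyGetD [0, -1, 0, 1] i 0) = mv →
        mv ∈ [(b_x - 1, b_y), (b_x, b_y - 1), (b_x + 1, b_y), (b_x, b_y + 1)] →
        ∀ s : List (List Int) × List Int × List Int × Bool, s.1 = board →
        pvTurnStep childA (board.length : Int) ((PySem.List.pyGetD board 0 []).length : Int) b_x b_y s i = s := by
      intro childA i mv hmv hmem s hs1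
      obtain ⟨mva, mvb⟩ := mv
      injection hmv with hmv1 hmv2
      unfold pvTurnStep
      dsimp only
      rw [hs1, hmv1, hmv2]
      rw [if_neg (hng (mva, mvb) hmem)]
    have stepB_id : ∀ (childB : List (List Int) → Int → Int → Int × Int × List (List Int))
        (mv : Int × Int),
        mv ∈ [(b_x - 1, b_y), (b_x, b_y - 1), (b_x + 1, b_y), (b_x, b_y + 1)] →
        ∀ s : List (List Int) × List Int × List Int, s.1 = board →
        pvSolveStep childB (board.length : Int) ((PySem.List.pyGetD board 0 []).length : Int) b_x b_y s mv = s := by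
      intro childB mv hmem s hs1
      unfold pvSolveStep
      rw [hs1]
      rw [if_neg (hng mv hmem)]
    simp only [List.foldl]
    rw [stepA_id _ 0 (b_x - 1, b_y) (by rw [Prod.mk.injEq]; refine ⟨by norm_num [pysem]; (try decide); (try omega), by norm_num [pysem]; (try decide); (try omega)⟩) (by simp) _ rfl]
    rw [stepA_id _ 1 (b_x, b_y - 1) (by rw [Prod.mk.injEq]; refine ⟨by norm_num [pysem]; (try decide); (try omega), by norm_num [pysem]; (try decide); (try omega)⟩) (by simp) _ rfl]
    rw [stepA_id _ 2 (b_x + 1, b_y) (by rw [Prod.mk.injEq]; refine ⟨by norm_num [pysem]; (try decide); (try omega), by norm_num [pysem]; (try decide); (try omega)⟩) (by simp) _ rfl]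
    rw [stepA_id _ 3 (b_x, b_y + 1) (by rw [Prod.mk.injEq]; refine ⟨by norm_num [pysem]; (try decide); (try omega), by norm_num [pysem]; (try decide); (try omega)⟩) (by simp) _ rfl]
    rw [stepB_id _ (b_x - 1, b_y) (by simp) _ rfl]
    rw [stepB_id _ (b_x, b_y - 1) (by simp) _ rfl]
    rw [stepB_id _ (b_x + 1, b_y) (by simp) _ rfl]
    rw [stepB_id _ (b_x, b_y + 1) (by simp) _ rfl]
    simp

-- ===== VERDICT (by name: the statement is the Claim_ definition above) =====
theorem B_turn_spec : Claim_equal_B_turn := by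
  intro board b_x b_y a_x a_y cnt hdom hpre
  unfold Spec_B_turn
  obtain ⟨hbx, hby, hcase⟩ := hpre
  have hlen0 : 0 < board.length := by
    rcases hbx with ⟨h1, h2⟩; omega
  have hget0 : PySem.List.pyGetD board 0 [] = board.headD [] := by
    cases board with
    | nil => simp at hlen0
    | cons r t => simp [pysem]
  rcases hcase with hnat | hzero | hnomove
  · obtain ⟨hm0, hrows, hbx0, hby0, hax0, haxn, hay0, hayn⟩ := hnat
    have hrect : pvRect board (board.length : Int) ((board.headD []).length : Int) :=
      ⟨rfl, fun r hr => by exact_mod_cast congrArg Nat.cast (hrows r hr)⟩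
    have hbxn : b_x < (board.length : Int) := hbx.2
    have hbym : b_y < ((board.headD []).length : Int) := by
      have hx' : b_x.toNat < board.length := by rcases hbx with ⟨h1, h2⟩; omega
      have hrowlen := hrows _ (List.getElem_mem hx')
      rw [PySem.List.pyGetD_eq_getElem board [] hbx0 (by exact_mod_cast hbx.2)] at hby
      rcases hby with ⟨h1, h2⟩
      omega
    have hmain := pvBturn_eq_solve (pvFuel board) (board.length : Int) ((board.headD []).length : Int)
      board b_x b_y a_x a_y cnt hrect hbx0 hbxn hby0 hbym hax0 haxn hay0 hayn
    unfold B_turn B_turn_alt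
    rw [hget0, hmain]
  · unfold B_turn B_turn_alt
    simp only [pvFuel, pvBturn, pvSolve]
    rw [if_pos hzero, if_pos hzero]
    simp
  · exact pv_nomove_case board b_x b_y a_x a_y cnt hnomove
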